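-- pv_equiv track=rewrite | github.com/nat/natbot | weblm/controller.py | split_list_by_separators
-- ===== SOURCE A (Python) =====
-- from typing import Any, DefaultDict, Dict, List, Tuple, Union
--
-- def split_list_by_separators(l: List[Any], separator_sequences: List[List[Any]]) -> List[List[Any]]:
--     """Split a list by a subsequence.
--
--     split_list_by_separators(range(7), [[2, 3], [5]]) == [[0, 1], [4], [6]]
--     """
--     split_list: List[List[Any]] = []
--     tmp_seq: List[Any] = []
--
--     i = 0
--     while i < len(l):
--         item = l[i]
--         # if this item may be part of one of the separator_sequences
--         if any(item == x[0] for x in separator_sequences):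
--             for s in filter(lambda x: item == x[0], separator_sequences):
--                 # if we've found a matching subsequence
--                 if l[i:i + len(s)] == s:
--                     if len(tmp_seq) != 0:
--                         split_list.append(tmp_seq)
--                     tmp_seq = []
--                     i += len(s)
--                     break
--             else:
--                 i += 1
--         else:
--             tmp_seq.append(item)
--             i += 1
--
--     if len(tmp_seq) != 0:
--         split_list.append(tmp_seq)
--
--     return split_list
-- ===== SOURCE B (Python) =====
-- from typing import Any, List
--
-- def split_list_by_separators(l: List[Any], separator_sequences: List[List[Any]]) -> List[List[Any]]:
--     """Two-pass version: first precompute, per index, the length of the first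
--     fully-matching separator (0 if none) and whether any separator merely starts
--     here; then do one greedy splitting pass over those tables."""
--     n = len(l)
--     match_len = [0] * n
--     starts_sep = [False] * n
--     for i in range(n):
--         for s in separator_sequences:
--             if l[i] == s[0]:
--                 starts_sep[i] = True
--                 if match_len[i] == 0 and l[i:i + len(s)] == s:
--                     match_len[i] = len(s)
--
--     split_list: List[List[Any]] = []
--     tmp_seq: List[Any] = []
--     i = 0
--     while i < n:
--         if match_len[i] > 0:
--             if tmp_seq:
--                 split_list.append(tmp_seq)
--             tmp_seq = []
--             i += match_len[i]
--         elif starts_sep[i]: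
--             i += 1
--         else:
--             tmp_seq.append(l[i])
--             i += 1
--     if tmp_seq:
--         split_list.append(tmp_seq)
--     return split_list
-- ===== Notes on version B (the rewrite author's own statement) =====
-- stated objective: alternative
-- what changed: B separates match-finding from splitting: a first pass builds per-index tables match_len/starts_sep, then a single table-driven greedy pass produces the chunks, instead of A's inline rescan of the separator list with a for/else inside the while loop.
-- outside the precondition, e.g. on split_list_by_separators([5], [[5], []]): A returns [], B raises IndexError
import Mathlib
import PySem

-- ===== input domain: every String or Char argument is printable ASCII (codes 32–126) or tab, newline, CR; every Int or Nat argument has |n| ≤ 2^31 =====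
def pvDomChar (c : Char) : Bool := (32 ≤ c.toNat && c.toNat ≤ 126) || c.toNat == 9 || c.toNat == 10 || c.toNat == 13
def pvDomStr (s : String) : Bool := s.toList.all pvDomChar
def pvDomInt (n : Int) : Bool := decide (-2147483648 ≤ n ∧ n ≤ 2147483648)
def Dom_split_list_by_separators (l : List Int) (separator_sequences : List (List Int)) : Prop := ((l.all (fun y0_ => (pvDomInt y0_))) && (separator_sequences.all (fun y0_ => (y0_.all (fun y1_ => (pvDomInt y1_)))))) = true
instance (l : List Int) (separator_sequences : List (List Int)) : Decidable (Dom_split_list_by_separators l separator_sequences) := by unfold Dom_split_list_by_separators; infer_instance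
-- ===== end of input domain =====

-- B replaces A's inline for/else separator rescan by a two-pass table algorithm
-- (precomputed match_len/starts_sep per index, then one table-driven greedy pass);
-- objective: alternative decomposition, same asymptotic cost.

-- ===== PORT A =====
-- the inner `for s in filter(lambda x: item == x[0], separator_sequences): if l[i:i+len(s)] == s: … break`:
-- returns the length of the first fully matching separator, none if the for-loop falls through to its else.
-- (an empty separator means Python already raised IndexError at x[0]; such inputs are outside Pre_.)
def pvAFor (l : List Int) (i : Nat) (item : Int) : List (List Int) → Option Nat
  | [] => none
  | [] :: rest => pvAFor l i item rest
  | (a :: t) :: rest =>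
    if item = a then
      if PySem.List.slice l (some (i : Int)) (some ((i : Int) + ((a :: t).length : Int))) = a :: t then
        some (a :: t).length
      else pvAFor l i item rest
    else pvAFor l i item rest

-- cited by pvALoop's decreasing_by: a matched separator is nonempty
theorem pvAFor_pos (l : List Int) (i : Nat) (item : Int) (seps : List (List Int)) (k : Nat)
    (h : pvAFor l i item seps = some k) : 0 < k := by
  induction seps with
  | nil => simp [pvAFor] at h
  | cons s rest ih =>
    cases s with
    | nil => rw [pvAFor] at h; exact ih h
    | cons a t =>
      rw [pvAFor] at h
      split_ifs at h with h1 h2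
      · simp at h; omega
      · exact ih h
      · exact ih h

-- the `while i < len(l)` loop of A, state (i, split_list, tmp_seq)
def pvALoop (l : List Int) (seps : List (List Int)) (i : Nat)
    (split : List (List Int)) (tmp : List Int) : List (List Int) :=
  if h : i < l.length then
    if seps.any (fun x => l.getD i 0 = x.headI) then
      match hm : pvAFor l i (l.getD i 0) seps with
      | some k => pvALoop l seps (i + k) (if tmp = [] then split else split ++ [tmp]) []
      | none => pvALoop l seps (i + 1) split tmp
    else pvALoop l seps (i + 1) split (tmp ++ [l.getD i 0])
  else if tmp = [] then split else split ++ [tmp]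
termination_by l.length - i
decreasing_by
  · have := pvAFor_pos l i (l.getD i 0) seps k hm; omega
  · omega
  · omega

def split_list_by_separators (l : List Int) (separator_sequences : List (List Int)) : List (List Int) :=
  pvALoop l separator_sequences 0 [] []

-- ===== PORT B =====
-- first pass, inner loop for one index i: fold over the separators updating (starts_sep[i], match_len[i])
-- (the `[] :: rest` case is where Python B raises at s[0]; such inputs are outside Pre_)
def pvBRow (l : List Int) (i : Nat) : List (List Int) → Bool × Nat → Bool × Nat
  | [], st => st
  | [] :: rest, st => pvBRow l i rest st
  | (a :: t) :: rest, (b, m) =>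
    if l.getD i 0 = a then
      pvBRow l i rest
        (true,
         if m = 0 ∧ PySem.List.slice l (some (i : Int)) (some ((i : Int) + ((a :: t).length : Int))) = a :: t
         then (a :: t).length else m)
    else pvBRow l i rest (b, m)

-- the tables (starts_sep[i], match_len[i]) for i in range(len(l))
def pvBTable (l : List Int) (seps : List (List Int)) : List (Bool × Nat) :=
  (List.range l.length).map (fun i => pvBRow l i seps (false, 0))

-- second pass: the table-driven greedy splitting loop
def pvBLoop (l : List Int) (tbl : List (Bool × Nat)) (i : Nat)
    (split : List (List Int)) (tmp : List Int) : List (List Int) :=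
  if h : i < l.length then
    if hr : 0 < (tbl.getD i (false, 0)).2 then
      pvBLoop l tbl (i + (tbl.getD i (false, 0)).2) (if tmp = [] then split else split ++ [tmp]) []
    else if (tbl.getD i (false, 0)).1 then pvBLoop l tbl (i + 1) split tmp
    else pvBLoop l tbl (i + 1) split (tmp ++ [l.getD i 0])
  else if tmp = [] then split else split ++ [tmp]
termination_by l.length - i
decreasing_by
  · omega
  · omega
  · omega

def split_list_by_separators_alt (l : List Int) (separator_sequences : List (List Int)) : List (List Int) :=
  pvBLoop l (pvBTable l separator_sequences) 0 [] []

-- ===== PRECONDITION & SPEC =====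
-- Pre_ excludes nonempty l together with an empty separator sequence: there Python A
-- raises IndexError at x[0] unless `any` short-circuits first, and where A does still
-- return (e.g. ([5], [[5], []])) B's table pass, which inspects every s[0], raises.
def Pre_split_list_by_separators (l : List Int) (separator_sequences : List (List Int)) : Prop :=
  l = [] ∨ [] ∉ separator_sequences
instance (l : List Int) (separator_sequences : List (List Int)) : Decidable (Pre_split_list_by_separators l separator_sequences) := by unfold Pre_split_list_by_separators; infer_instance

def pvWitness_split_list_by_separators : List Int × List (List Int) :=
  ([0, 1, 2, 3, 4, 5, 6], [[2, 3], [5]])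

def Spec_split_list_by_separators (l : List Int) (separator_sequences : List (List Int)) (out : List (List Int)) : Prop := out = split_list_by_separators_alt l separator_sequences
instance (l : List Int) (separator_sequences : List (List Int)) (out : List (List Int)) : Decidable (Spec_split_list_by_separators l separator_sequences out) := by unfold Spec_split_list_by_separators; infer_instance

-- ===== CLAIM (what is proved, stated in full; the proofs are below) =====
def Claim_equal_split_list_by_separators : Prop := ∀ (l : List Int) (separator_sequences : List (List Int)), Dom_split_list_by_separators l separator_sequences → Pre_split_list_by_separators l separator_sequences → Spec_split_list_by_separators l separator_sequences (split_list_by_separators l separator_sequences)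

-- ===== LEMMAS AND PROOFS =====

-- once match_len[i] is nonzero it is never overwritten
theorem pvBRow_snd_stay (l : List Int) (i : Nat) (seps : List (List Int)) (b : Bool) (m : Nat)
    (hm : m ≠ 0) : (pvBRow l i seps (b, m)).2 = m := by
  induction seps generalizing b with
  | nil => rfl
  | cons s rest ih =>
    cases s with
    | nil => rw [pvBRow]; exact ih b
    | cons a t =>
      rw [pvBRow]
      by_cases h1 : l.getD i 0 = a
      · rw [if_pos h1, if_neg (by simp [hm])]
        exact ih true
      · rw [if_neg h1]; exact ih b

-- the match_len entry equals A's inner-for result (0 when it falls through)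
theorem pvBRow_snd (l : List Int) (i : Nat) (seps : List (List Int)) (b : Bool) :
    (pvBRow l i seps (b, 0)).2 = (pvAFor l i (l.getD i 0) seps).getD 0 := by
  induction seps generalizing b with
  | nil => rfl
  | cons s rest ih =>
    cases s with
    | nil => rw [pvBRow, pvAFor]; exact ih b
    | cons a t =>
      rw [pvBRow, pvAFor]
      by_cases h1 : l.getD i 0 = a
      · rw [if_pos h1, if_pos h1]
        by_cases h2 : PySem.List.slice l (some (i : Int)) (some ((i : Int) + ((a :: t).length : Int))) = a :: t
        · rw [if_pos (⟨rfl, h2⟩), if_pos h2]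
          rw [pvBRow_snd_stay l i rest true (a :: t).length (by simp)]
          rfl
        · rw [if_neg (fun hc => h2 hc.2), if_neg h2]
          exact ih true
      · rw [if_neg h1, if_neg h1]
        exact ih b

-- the starts_sep entry equals A's `any(item == x[0] …)` (when no separator is empty)
theorem pvBRow_fst (l : List Int) (i : Nat) (seps : List (List Int)) (hne : [] ∉ seps) :
    ∀ (b : Bool) (m : Nat),
      (pvBRow l i seps (b, m)).1 = (b || seps.any (fun x => l.getD i 0 = x.headI)) := by
  induction seps with
  | nil => simp [pvBRow]
  | cons s rest ih =>
    have hrest : [] ∉ rest := fun h => hne (List.mem_cons_of_mem _ h)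
    intro b m
    cases s with
    | nil => exact absurd List.mem_cons_self hne
    | cons a t =>
      rw [pvBRow]
      by_cases h1 : l.getD i 0 = a
      · rw [if_pos h1, ih hrest]
        have h1' : l[i]?.getD 0 = a := h1
        simp [List.headI, List.getD, h1']
      · rw [if_neg h1, ih hrest]
        have h1' : ¬ l[i]?.getD 0 = a := h1
        simp [List.headI, List.getD, h1']

-- if no separator starts with item, the inner for matches nothing
theorem pvAFor_none (l : List Int) (i : Nat) (item : Int) (seps : List (List Int))
    (hne : [] ∉ seps)
    (h : seps.any (fun x => item = x.headI) = false) : pvAFor l i item seps = none := by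
  induction seps with
  | nil => rfl
  | cons s rest ih =>
    have hrest : [] ∉ rest := fun hm => hne (List.mem_cons_of_mem _ hm)
    cases s with
    | nil => exact absurd List.mem_cons_self hne
    | cons a t =>
      simp only [List.any_cons, Bool.or_eq_false_iff, decide_eq_false_iff_not, List.headI] at h
      rw [pvAFor, if_neg h.1]
      exact ih hrest (by simpa using h.2)

-- the table really stores pvBRow at every in-range index
theorem pvBTable_getD (l : List Int) (seps : List (List Int)) (i : Nat) (h : i < l.length) :
    (pvBTable l seps).getD i (false, 0) = pvBRow l i seps (false, 0) := by
  simp [pvBTable, List.getD, h]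

-- main invariant: from any common state the two loops produce the same output
theorem loops_eq (l : List Int) (seps : List (List Int)) (hne : [] ∉ seps) :
    ∀ n i, l.length - i ≤ n → ∀ split tmp,
      pvALoop l seps i split tmp = pvBLoop l (pvBTable l seps) i split tmp := by
  intro n
  induction n with
  | zero =>
    intro i hi split tmp
    have h : ¬ i < l.length := by omega
    rw [pvALoop, pvBLoop, dif_neg h, dif_neg h]
  | succ n ih =>
    intro i hi split tmp
    by_cases h : i < l.length
    · rw [pvALoop, pvBLoop, dif_pos h, dif_pos h]
      simp only [pvBTable_getD l seps i h, pvBRow_fst l i seps hne false 0,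
        pvBRow_snd l i seps false, Bool.false_or]
      by_cases hany : (seps.any (fun x => l.getD i 0 = x.headI)) = true
      · rw [if_pos hany]
        cases hm : pvAFor l i (l.getD i 0) seps with
        | some k =>
          have hk := pvAFor_pos l i (l.getD i 0) seps k hm
          simp only [Option.getD_some]
          rw [dif_pos hk]
          exact ih (i + k) (by omega) _ []
        | none =>
          simp only [Option.getD_none]
          rw [dif_neg (by omega), if_pos hany]
          exact ih (i + 1) (by omega) split tmp
      · have hany' : (seps.any (fun x => l.getD i 0 = x.headI)) = false := by
          simpa using hany
        rw [if_neg hany, pvAFor_none l i (l.getD i 0) seps hne hany']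
        simp only [Option.getD_none]
        rw [dif_neg (by omega), if_neg hany]
        exact ih (i + 1) (by omega) split (tmp ++ [l.getD i 0])
    · rw [pvALoop, pvBLoop, dif_neg h, dif_neg h]

-- ===== VERDICT (by name: the statement is the Claim_ definition above) =====
theorem split_list_by_separators_spec : Claim_equal_split_list_by_separators := by
  intro l seps _dom hpre
  unfold Spec_split_list_by_separators split_list_by_separators split_list_by_separators_alt
  cases hpre with
  | inl hl =>
    subst hl
    rw [pvALoop, pvBLoop]
    simp
  | inr hne =>
    exact loops_eq l seps hne l.length 0 (by omega) [] []
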